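-- pv_equiv track=rewrite | github.com/davidvlaminck/InfraDbToArangoDb | Analysis/TreeAnalysis/tree_analysis.py | _canonicalize_structure
-- ===== SOURCE A (Python) =====
-- from typing import Dict, Iterable, List, Set, Tuple, Any
--
-- def _canonicalize_structure(level_sets: Dict[int, Set[str]]) -> List[List[str]]:
--     """Produce canonical ordered list-of-lists for a structure.
--
--     level_sets: mapping depth->set(short_uri)
--     Returns ordered list from level 0 upward, each entry is a sorted list of short_uris.
--     """
--     if not level_sets:
--         return []
--     max_depth = max(level_sets.keys())
--     result: List[List[str]] = []
--     for depth in range(0, max_depth + 1):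
--         s = level_sets.get(depth, set())
--         result.append(sorted(s))
--     return result
-- ===== SOURCE B (Python) =====
-- from typing import Dict, List, Set
--
--
-- def _canonicalize_structure(level_sets: Dict[int, Set[str]]) -> List[List[str]]:
--     """Sort-then-scan: walk the nonnegative depths in ascending order,
--     padding the gaps between consecutive depths with empty levels."""
--     result: List[List[str]] = []
--     for depth in sorted(d for d in level_sets if d >= 0):
--         result.extend([] for _ in range(depth - len(result)))
--         result.append(sorted(level_sets[depth]))
--     return result
-- ===== Notes on version B (the rewrite author's own statement) =====
-- stated objective: alternative
-- what changed: Instead of computing max_depth and gathering over range(0, max_depth+1) with dict.get defaults, B sorts the nonnegative depth keys once and does a single scan over them, padding the gaps between consecutive depths with empty lists; no max, no dict.get, no empty-dict guard.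
import Mathlib
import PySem

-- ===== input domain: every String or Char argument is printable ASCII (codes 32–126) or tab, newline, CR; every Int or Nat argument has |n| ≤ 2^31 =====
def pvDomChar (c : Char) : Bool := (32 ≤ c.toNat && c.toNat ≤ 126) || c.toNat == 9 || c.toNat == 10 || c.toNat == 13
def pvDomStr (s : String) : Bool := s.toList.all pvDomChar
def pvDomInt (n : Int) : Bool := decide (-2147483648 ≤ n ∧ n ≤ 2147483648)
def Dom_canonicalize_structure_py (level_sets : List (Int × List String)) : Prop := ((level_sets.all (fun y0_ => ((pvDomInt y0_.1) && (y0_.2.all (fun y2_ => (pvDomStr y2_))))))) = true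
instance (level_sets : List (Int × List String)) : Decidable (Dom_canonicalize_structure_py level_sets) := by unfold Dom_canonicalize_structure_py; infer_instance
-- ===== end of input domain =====

-- B replaces A's max-then-gather loop (range(0, max_depth+1) with dict.get defaults) by a
-- sort-then-scan over the nonnegative depth keys, padding gaps between consecutive depths
-- with empty levels (alternative decomposition; same asymptotic cost).

-- ===== PORT A =====
-- dict.get on the association list: first match (a Python dict has unique keys)
def pvDictGet? (d : List (Int × List String)) (k : Int) : Option (List String) :=
  match d with
  | [] => none
  | (k', v) :: t => if k' = k then some v else pvDictGet? t k

def canonicalize_structure_py (level_sets : List (Int × List String)) : List (List String) :=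
  if level_sets = [] then []
  else
    match PySem.List.max? (level_sets.map (·.1)) (fun x => x) with
    | none => []   -- unreachable: level_sets ≠ []
    | some max_depth =>
      (PySem.List.pyRange 0 (max_depth + 1) 1).foldl
        (fun result depth =>
          result ++ [PySem.List.sorted ((pvDictGet? level_sets depth).getD []) (fun x => x) false])
        []

-- ===== PORT B =====
-- Python's level_sets[depth] is ported as (pvDictGet? … depth).getD []; the key is always
-- present there (depth comes from the sorted key list), so the default is never used.
def canonicalize_structure_py_alt (level_sets : List (Int × List String)) : List (List String) :=
  (PySem.List.sorted ((level_sets.map (·.1)).filter (fun d => decide (0 ≤ d))) (fun x => x) false).foldl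
    (fun result depth =>
      (result ++ List.replicate (depth - (result.length : Int)).toNat ([] : List String)) ++
        [PySem.List.sorted ((pvDictGet? level_sets depth).getD []) (fun x => x) false])
    []

-- ===== PRECONDITION & SPEC =====
-- Pre_ excludes association lists with duplicate depth keys: such inputs cannot arise from a
-- Python dict (the Python parameter is a dict), so nothing A returns on is excluded.
def Pre_canonicalize_structure_py (level_sets : List (Int × List String)) : Prop :=
  (level_sets.map (·.1)).Nodup
instance (level_sets : List (Int × List String)) : Decidable (Pre_canonicalize_structure_py level_sets) := by
  unfold Pre_canonicalize_structure_py; infer_instance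
def pvWitness_canonicalize_structure_py : (List (Int × List String)) := [(2, ["x", "a"]), (0, ["b"]), (-1, ["z"])]
def Spec_canonicalize_structure_py (level_sets : List (Int × List String)) (out : List (List String)) : Prop := out = canonicalize_structure_py_alt level_sets
instance (level_sets : List (Int × List String)) (out : List (List String)) : Decidable (Spec_canonicalize_structure_py level_sets out) := by unfold Spec_canonicalize_structure_py; infer_instance

-- ===== CLAIM =====
def Claim_equal_canonicalize_structure_py : Prop := ∀ (level_sets : List (Int × List String)), Dom_canonicalize_structure_py level_sets → Pre_canonicalize_structure_py level_sets → Spec_canonicalize_structure_py level_sets (canonicalize_structure_py level_sets)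

-- ===== LEMMAS AND PROOFS =====

-- value of level j rendered as A computes it
def pvLevel (ls : List (Int × List String)) (j : Int) : List String :=
  PySem.List.sorted ((pvDictGet? ls j).getD []) (fun x => x) false

-- If k is not a key of d, pvDictGet? d k = none.
theorem pvDictGet?_eq_none_of_not_mem (d : List (Int × List String)) (k : Int)
    (h : k ∉ d.map (·.1)) : pvDictGet? d k = none := by
  induction d with
  | nil => rfl
  | cons p t ih =>
    simp only [List.map_cons, List.mem_cons, not_or] at h
    simp only [pvDictGet?]
    rw [if_neg (fun hk => h.1 hk.symm)]
    exact ih h.2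

-- one step of B's scan fold
def pvScanStep (ls : List (Int × List String)) (result : List (List String)) (depth : Int) : List (List String) :=
  (result ++ List.replicate (depth - (result.length : Int)).toNat ([] : List String)) ++ [pvLevel ls depth]

-- end position of B's scan: one past the last processed depth
def pvEndOf (ks : List Int) (r : Int) : Int :=
  match ks with
  | [] => r
  | k :: t => pvEndOf t (k + 1)

theorem pvEndOf_eq_getLast (ks : List Int) (r : Int) (h : ks ≠ []) :
    pvEndOf ks r = ks.getLast h + 1 := by
  induction ks generalizing r with
  | nil => exact absurd rfl h
  | cons k t ih =>
    cases t with
    | nil => rfl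
    | cons k' t' => simpa [pvEndOf, List.getLast] using ih (k + 1) (by simp)

theorem le_getLast_of_pairwise_lt (ks : List Int) (h : ks.Pairwise (· < ·)) (x : Int)
    (hx : x ∈ ks) (hne : ks ≠ []) : x ≤ ks.getLast hne := by
  induction ks with
  | nil => exact absurd rfl hne
  | cons k t ih =>
    rcases List.pairwise_cons.mp h with ⟨hk, ht⟩
    cases t with
    | nil => simp_all
    | cons k' t' =>
      rw [List.getLast_cons (by simp)]
      rcases List.mem_cons.mp hx with hx | hx
      · subst hx
        have hg : (k' :: t').getLast (by simp) ∈ (k' :: t') := List.getLast_mem _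
        have := hk _ hg
        omega
      · exact ih ht hx (by simp)

-- B's scan fold, characterised: starting from the levels below r, a strictly increasing list
-- of depths ≥ r covering every key ≥ r extends the map of pvLevel up to pvEndOf.
theorem scan_fold (ls : List (Int × List String)) (ks : List Int) (r : Int)
    (hr : 0 ≤ r)
    (hinc : ks.Pairwise (· < ·))
    (hge : ∀ k ∈ ks, r ≤ k)
    (hkeys : ∀ j : Int, r ≤ j → j ∉ ks → pvDictGet? ls j = none) :
    ks.foldl (pvScanStep ls) ((PySem.List.pyRange 0 r 1).map (pvLevel ls)) =
      (PySem.List.pyRange 0 (pvEndOf ks r) 1).map (pvLevel ls) := by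
  induction ks generalizing r with
  | nil => rfl
  | cons k t ih =>
    rcases List.pairwise_cons.mp hinc with ⟨hkt, ht⟩
    have hrk : r ≤ k := hge k (List.mem_cons_self)
    simp only [List.foldl_cons, pvEndOf]
    have hstep : pvScanStep ls ((PySem.List.pyRange 0 r 1).map (pvLevel ls)) k =
        (PySem.List.pyRange 0 (k + 1) 1).map (pvLevel ls) := by
      unfold pvScanStep
      have hlen : (((PySem.List.pyRange 0 r 1).map (pvLevel ls)).length : Int) = r := by
        rw [List.length_map, PySem.List.length_pyRange_one]; omega
      rw [hlen]
      have hsplit : PySem.List.pyRange 0 (k + 1) 1 =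
          PySem.List.pyRange 0 r 1 ++ (PySem.List.pyRange r k 1 ++ [k]) := by
        rw [← PySem.List.pyRange_one_succ_right hrk]
        exact PySem.List.pyRange_one_append 0 r (k + 1) hr (by omega)
      rw [hsplit, List.map_append, List.map_append, List.append_assoc]
      congr 1
      congr 1
      -- the gap between r and k renders as empty levels
      · symm
        apply List.eq_replicate_iff.mpr
        constructor
        · rw [List.length_map, PySem.List.length_pyRange_one]
        · intro b hb
          rcases List.mem_map.mp hb with ⟨j, hj, rfl⟩
          rcases (PySem.List.mem_pyRange_one).mp hj with ⟨hj1, hj2⟩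
          have hnot : j ∉ k :: t := by
            intro hmem
            rcases List.mem_cons.mp hmem with h | h
            · omega
            · have := hkt j h; omega
          rw [pvLevel, hkeys j hj1 hnot]
          rfl
    rw [hstep]
    exact ih (k + 1) (by omega) ht (fun k' hk' => by have := hkt k' hk'; omega)
      (fun j hj hjn => hkeys j (by omega) (by
        intro hmem
        rcases List.mem_cons.mp hmem with h | h
        · omega
        · exact hjn h))

-- ===== VERDICT =====
theorem canonicalize_structure_py_spec : Claim_equal_canonicalize_structure_py := by
  intro ls _ hpre
  unfold Spec_canonicalize_structure_py canonicalize_structure_py canonicalize_structure_py_alt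
  set ks := PySem.List.sorted ((ls.map (·.1)).filter (fun d => decide (0 ≤ d))) (fun x => x) false with hks
  have hperm : ks.Perm ((ls.map (·.1)).filter (fun d => decide (0 ≤ d))) :=
    PySem.List.sorted_perm _ _ _
  have hmemks : ∀ x, x ∈ ks ↔ (0 ≤ x ∧ x ∈ ls.map (·.1)) := by
    intro x
    rw [hperm.mem_iff, List.mem_filter]
    simp [and_comm]
  have hnodup : ks.Nodup := hperm.nodup_iff.mpr (List.Nodup.filter _ hpre)
  have hinc : ks.Pairwise (· < ·) := by
    have h1 : ks.Pairwise (· ≤ ·) := PySem.List.sorted_pairwise _ _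
    have := List.Pairwise.and h1 hnodup
    exact this.imp (fun h => lt_of_le_of_ne h.1 h.2)
  have hkeys : ∀ j : Int, (0:Int) ≤ j → j ∉ ks → pvDictGet? ls j = none := by
    intro j hj hjn
    apply pvDictGet?_eq_none_of_not_mem
    intro hmem
    exact hjn ((hmemks j).mpr ⟨hj, hmem⟩)
  by_cases hnil : ls = []
  · subst hnil; rfl
  · rw [if_neg hnil]
    cases hm : PySem.List.max? (ls.map (·.1)) (fun x => x) with
    | none =>
      exact absurd (by simpa using (PySem.List.max?_eq_none_iff _ _).mp hm) hnil
    | some m =>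
      dsimp only
      rw [PySem.List.foldl_append_singleton_eq_map, List.nil_append]
      have hfold := scan_fold ls ks 0 (le_refl 0) hinc
        (fun k hk => ((hmemks k).mp hk).1) hkeys
      have hB : (ks.foldl
          (fun result depth =>
            (result ++ List.replicate (depth - (result.length : Int)).toNat ([] : List String)) ++
              [PySem.List.sorted ((pvDictGet? ls depth).getD []) (fun x => x) false]) []) =
          ks.foldl (pvScanStep ls) (((PySem.List.pyRange 0 0 1).map (pvLevel ls))) := rfl
      rw [hB, hfold]
      have hmmem : m ∈ ls.map (·.1) := PySem.List.max?_mem hm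
      have hmax : ∀ y ∈ ls.map (·.1), y ≤ m := fun y hy => PySem.List.max?_isMax hm y hy
      rcases eq_or_ne ks [] with hksnil | hksne
      · rw [hksnil]
        have hmneg : m < 0 := by
          by_contra h
          have : m ∈ ks := (hmemks m).mpr ⟨by omega, hmmem⟩
          simp [hksnil] at this
        rw [show pvEndOf [] 0 = 0 from rfl,
          PySem.List.pyRange_one_eq_nil (by omega : m + 1 ≤ 0)]
        rfl
      · rw [pvEndOf_eq_getLast ks 0 hksne]
        have hlmem : ks.getLast hksne ∈ ks := List.getLast_mem hksne
        have hl0 : 0 ≤ ks.getLast hksne := ((hmemks _).mp hlmem).1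
        have hlle : ks.getLast hksne ≤ m := hmax _ ((hmemks _).mp hlmem).2
        have hmem : m ∈ ks := (hmemks m).mpr ⟨by omega, hmmem⟩
        have hmle : m ≤ ks.getLast hksne := le_getLast_of_pairwise_lt ks hinc m hmem hksne
        have : ks.getLast hksne = m := by omega
        rw [this]
        rfl
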